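-- pv_equiv track=rewrite | github.com/jadewisemann/ps_everyday | 프로그래머스(완전탐색^lv1)모의고사.py | solution
-- ===== SOURCE A (Python) =====
-- arr_1 = [1, 2, 3, 4, 5, 1, 2, 3, 4, 5]
--
-- arr_2 = [2, 1, 2, 3, 2, 4, 2, 5, 2, 1, 2, 3, 2, 4, 2, 5]
--
-- arr_3 = [3, 3, 1, 1, 2, 2, 4, 4, 5, 5, 3, 3, 1, 1, 2, 2, 4, 4, 5, 5]
--
-- def solution(answers):
--     scores = {
--         1: 0,
--         2: 0,
--         3: 0
--     }
--
--     for idx in range(len(answers)):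
--         curr = answers[idx]
--         if arr_1[idx%len(arr_1)] == curr:
--             scores[1] += 1
--         if arr_2[idx%len(arr_2)] == curr:
--             scores[2] += 1
--         if arr_3[idx%len(arr_3)] == curr:
--             scores[3] += 1
--
--     return([student for student, score in scores.items() if score == max(scores.values())])
-- ===== SOURCE B (Python) =====
-- arr_1 = [1, 2, 3, 4, 5, 1, 2, 3, 4, 5]
--
-- arr_2 = [2, 1, 2, 3, 2, 4, 2, 5, 2, 1, 2, 3, 2, 4, 2, 5]
--
-- arr_3 = [3, 3, 1, 1, 2, 2, 4, 4, 5, 5, 3, 3, 1, 1, 2, 2, 4, 4, 5, 5]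
--
--
-- def _score(pattern, answers):
--     # materialise the student's full predicted answer sheet by repetition,
--     # then compare it to the real sheet position by position
--     reps = len(answers) // len(pattern) + 1
--     predicted = (pattern * reps)[:len(answers)]
--     return sum(1 for p, a in zip(predicted, answers) if p == a)
--
--
-- def solution(answers):
--     scores = [_score(p, answers) for p in (arr_1, arr_2, arr_3)]
--     best = max(scores)
--     return [i + 1 for i, s in enumerate(scores) if s == best]
-- ===== Notes on version B (the rewrite author's own statement) =====
-- stated objective: alternative
-- what changed: A's single interleaved index loop doing three modular pattern lookups into a dict of counters is replaced by materialising each student's full predicted answer sheet (pattern repeated and truncated to len(answers)) and scoring it by a positional zip comparison, with winners rebuilt from the score list; no modular indexing remains.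
import Mathlib
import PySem

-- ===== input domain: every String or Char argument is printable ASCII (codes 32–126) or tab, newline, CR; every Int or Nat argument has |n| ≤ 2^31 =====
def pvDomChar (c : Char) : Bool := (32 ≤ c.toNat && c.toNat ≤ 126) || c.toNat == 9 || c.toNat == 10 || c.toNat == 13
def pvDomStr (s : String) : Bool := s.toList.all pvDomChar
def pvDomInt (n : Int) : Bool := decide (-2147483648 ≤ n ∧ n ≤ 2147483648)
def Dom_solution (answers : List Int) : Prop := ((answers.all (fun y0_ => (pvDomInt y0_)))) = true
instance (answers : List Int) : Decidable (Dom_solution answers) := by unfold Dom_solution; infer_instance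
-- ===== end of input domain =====

-- B replaces A's interleaved modular-lookup counting loop by building each student's full
-- predicted answer sheet (pattern repeated, truncated) and comparing it to the answers
-- position by position with zip (objective: alternative, same O(n) cost).

-- ===== PORT A =====
def pvArr1 : List Int := [1, 2, 3, 4, 5, 1, 2, 3, 4, 5]
def pvArr2 : List Int := [2, 1, 2, 3, 2, 4, 2, 5, 2, 1, 2, 3, 2, 4, 2, 5]
def pvArr3 : List Int := [3, 3, 1, 1, 2, 2, 4, 4, 5, 5, 3, 3, 1, 1, 2, 2, 4, 4, 5, 5]

-- 'answers[idx]' and 'arr_k[idx % len(arr_k)]' are always in range (idx ∈ range(len(answers)),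
-- mod of a positive length), so pyGetD with default 0 is exact; 'scores[k] += 1' is Dict.modify
-- at an existing key, exact here. 'max(scores.values())' is on a nonempty list, so .getD 0 is exact.
def solution (answers : List Int) : List Int :=
  let scores : PySem.Dict Int Int :=
    ((PySem.Dict.empty.insert 1 0).insert 2 0).insert 3 0
  let scores := (PySem.List.pyRange 0 (PySem.List.len answers) 1).foldl
    (fun d idx =>
      let curr := PySem.List.pyGetD answers idx 0
      let d := if PySem.List.pyGetD pvArr1 (PySem.Int.mod idx (PySem.List.len pvArr1)) 0 == curr
               then d.modify 1 0 (· + 1) else d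
      let d := if PySem.List.pyGetD pvArr2 (PySem.Int.mod idx (PySem.List.len pvArr2)) 0 == curr
               then d.modify 2 0 (· + 1) else d
      let d := if PySem.List.pyGetD pvArr3 (PySem.Int.mod idx (PySem.List.len pvArr3)) 0 == curr
               then d.modify 3 0 (· + 1) else d
      d) scores
  (scores.items.filter
      (fun p => p.2 == (PySem.List.max? scores.values (fun x => x)).getD 0)).map (fun p => p.1)

-- ===== PORT B =====
-- Python 'pattern * reps' is reps concatenated copies — ported as (List.replicate · ·).flatten,
-- exact; reps = len(answers)//len(pattern) + 1 is nonnegative, so .toNat is exact;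
-- the slice [:len(answers)] is PySem.List.slice with its Python clamping.
def pvScore (pattern : List Int) (answers : List Int) : Int :=
  let reps := PySem.Int.floordiv (PySem.List.len answers) (PySem.List.len pattern) + 1
  let predicted :=
    PySem.List.slice ((List.replicate reps.toNat pattern).flatten) none (some (PySem.List.len answers))
  (predicted.zip answers).foldl (fun s pa => if pa.1 == pa.2 then s + 1 else s) 0

def solution_alt (answers : List Int) : List Int :=
  let scores := ([pvArr1, pvArr2, pvArr3]).map (fun p => pvScore p answers)
  let best := (PySem.List.max? scores (fun x => x)).getD 0
  ((PySem.List.enumerate scores 0).filter (fun p => p.2 == best)).map (fun p => p.1 + 1)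

-- ===== PRECONDITION & SPEC =====
def Spec_solution (answers : List Int) (out : List Int) : Prop := out = solution_alt answers
instance (answers : List Int) (out : List Int) : Decidable (Spec_solution answers out) := by unfold Spec_solution; infer_instance

-- ===== CLAIM (what is proved, stated in full; the proofs are below) =====
def Claim_equal_solution : Prop := ∀ (answers : List Int), Dom_solution answers → Spec_solution answers (solution answers)

-- ===== LEMMAS AND PROOFS =====

-- A's loop state after n iterations is exactly the triple of per-pattern counting folds.
theorem pv_loop_eq (answers : List Int) (n : Nat) :
    (PySem.List.pyRange 0 (n : Int) 1).foldl
      (fun d idx =>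
        let curr := PySem.List.pyGetD answers idx 0
        let d := if PySem.List.pyGetD pvArr1 (PySem.Int.mod idx (PySem.List.len pvArr1)) 0 == curr
                 then d.modify 1 0 (· + 1) else d
        let d := if PySem.List.pyGetD pvArr2 (PySem.Int.mod idx (PySem.List.len pvArr2)) 0 == curr
                 then d.modify 2 0 (· + 1) else d
        let d := if PySem.List.pyGetD pvArr3 (PySem.Int.mod idx (PySem.List.len pvArr3)) 0 == curr
                 then d.modify 3 0 (· + 1) else d
        d)
      ((((PySem.Dict.empty : PySem.Dict Int Int).insert 1 0).insert 2 0).insert 3 0) =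
    PySem.Dict.mk
      [(1, (PySem.List.pyRange 0 (n : Int) 1).foldl
            (fun s i => if PySem.List.pyGetD pvArr1 (PySem.Int.mod i (PySem.List.len pvArr1)) 0 ==
                           PySem.List.pyGetD answers i 0 then s + 1 else s) 0),
       (2, (PySem.List.pyRange 0 (n : Int) 1).foldl
            (fun s i => if PySem.List.pyGetD pvArr2 (PySem.Int.mod i (PySem.List.len pvArr2)) 0 ==
                           PySem.List.pyGetD answers i 0 then s + 1 else s) 0),
       (3, (PySem.List.pyRange 0 (n : Int) 1).foldl
            (fun s i => if PySem.List.pyGetD pvArr3 (PySem.Int.mod i (PySem.List.len pvArr3)) 0 ==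
                           PySem.List.pyGetD answers i 0 then s + 1 else s) 0)] := by
  induction n with
  | zero =>
    rw [show ((0 : Nat) : Int) = 0 from rfl, PySem.List.pyRange_one_eq_nil le_rfl]
    rfl
  | succ n ih =>
    have h0 : (0 : Int) ≤ (n : Int) := Int.natCast_nonneg n
    have hcast : ((n + 1 : Nat) : Int) = (n : Int) + 1 := by push_cast; ring
    rw [hcast, PySem.List.pyRange_one_succ_right h0]
    simp only [List.foldl_append, List.foldl_cons, List.foldl_nil, ih]
    split_ifs <;>
      simp [PySem.Dict.modify, PySem.Dict.getD, PySem.Dict.insert, PySem.Dict.get?]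

-- repeated pattern, read at position k, is the pattern at k mod its length
theorem pv_flat_rep_getD (p : List Int) : ∀ (m k : Nat), k < m * p.length →
    ((List.replicate m p).flatten).getD k 0 = p.getD (k % p.length) 0 := by
  intro m
  induction m with
  | zero => intro k hk; omega
  | succ m ih =>
    intro k hk
    have hL : 0 < p.length := by by_contra h; simp at h; simp [h] at hk
    rw [List.replicate_succ, List.flatten_cons]
    by_cases hkL : k < p.length
    · rw [List.getD_eq_getElem?_getD, List.getElem?_append_left hkL,
        Nat.mod_eq_of_lt hkL, ← List.getD_eq_getElem?_getD]
    · rw [not_lt] at hkL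
      rw [List.getD_eq_getElem?_getD, List.getElem?_append_right hkL,
        ← List.getD_eq_getElem?_getD, ih (k - p.length) (by rw [Nat.succ_mul] at hk; omega)]
      congr 1
      conv_rhs => rw [show k = (k - p.length) + p.length from by omega]
      rw [Nat.add_mod_right]

-- countP of a zip of equal-length lists, as a countP over indices
theorem pv_zip_countP : ∀ (xs ys : List Int), xs.length = ys.length →
    (xs.zip ys).countP (fun pa => pa.1 == pa.2) =
    (List.range ys.length).countP (fun k => xs.getD k 0 == ys.getD k 0) := by
  intro xs
  induction xs with
  | nil => intro ys h; simp at h; simp [← h]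
  | cons x xs ih =>
    intro ys h
    cases ys with
    | nil => simp at h
    | cons y ys =>
      simp only [List.length_cons, Nat.add_right_cancel_iff] at h
      rw [List.zip_cons_cons, List.countP_cons, List.length_cons,
        List.range_succ_eq_map, List.countP_cons, List.countP_map, ih ys h]
      simp [Function.comp_def]

-- the winner selection agrees once both sides hold the same three scores
theorem pv_final (s1 s2 s3 : Int) :
    ((PySem.Dict.mk [((1 : Int), s1), (2, s2), (3, s3)]).items.filter
        (fun p => p.2 == (PySem.List.max?
            (PySem.Dict.mk [((1 : Int), s1), (2, s2), (3, s3)]).values (fun x => x)).getD 0)).map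
      (fun p => p.1) =
    ((PySem.List.enumerate [s1, s2, s3] 0).filter
        (fun p => p.2 == (PySem.List.max? [s1, s2, s3] (fun x => x)).getD 0)).map
      (fun p => p.1 + 1) := by
  simp only [PySem.Dict.values, PySem.List.enumerate_cons,
    PySem.List.enumerate_nil, List.map_cons, List.map_nil, List.filter_cons, List.filter_nil]
  generalize (PySem.List.max? [s1, s2, s3] (fun x => x)).getD 0 = M
  split_ifs <;> simp

-- A's per-pattern counting fold computes B's sheet-comparison score
theorem pv_score_eq (p : List Int) (hp : p ≠ []) (answers : List Int) :
    (PySem.List.pyRange 0 (PySem.List.len answers) 1).foldl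
      (fun s i => if PySem.List.pyGetD p (PySem.Int.mod i (PySem.List.len p)) 0 ==
                     PySem.List.pyGetD answers i 0 then s + 1 else s) 0 =
    pvScore p answers := by
  have hL : 0 < p.length := List.length_pos_iff.mpr hp
  simp only [pvScore]
  have hreps : (PySem.Int.floordiv (PySem.List.len answers) (PySem.List.len p) + 1).toNat
      = answers.length / p.length + 1 := by
    rw [PySem.List.len_eq, PySem.List.len_eq, PySem.Int.floordiv_natCast,
      show ((answers.length / p.length : Nat) : Int) + 1 = ((answers.length / p.length + 1 : Nat) : Int) from by push_cast; ring,
      Int.toNat_natCast]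
  rw [hreps, show PySem.List.len answers = ((answers.length : Nat) : Int) from PySem.List.len_eq _,
    PySem.List.slice_to_natCast]
  set flat := (List.replicate (answers.length / p.length + 1) p).flatten with hflat
  have hflatlen : flat.length = (answers.length / p.length + 1) * p.length := by
    simp [hflat, List.length_flatten, Nat.mul_comm]
  have hn_lt : answers.length < flat.length := by
    have h1 := Nat.div_add_mod answers.length p.length
    have h2 := Nat.mod_lt answers.length hL
    rw [hflatlen, Nat.add_mul, one_mul, Nat.mul_comm]
    omega
  have hpredlen : (flat.take answers.length).length = answers.length := by
    simp [Nat.le_of_lt hn_lt]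
  rw [PySem.List.foldl_if_add_one
        (fun i => PySem.List.pyGetD p (PySem.Int.mod i (PySem.List.len p)) 0 ==
                  PySem.List.pyGetD answers i 0)
        (PySem.List.pyRange 0 ((answers.length : Nat) : Int) 1) 0]
  rw [PySem.List.foldl_if_add_one (fun pa : Int × Int => pa.1 == pa.2)
        ((flat.take answers.length).zip answers) 0]
  rw [pv_zip_countP _ _ hpredlen]
  rw [PySem.List.pyRange_one]
  simp only [Int.sub_zero, Int.toNat_natCast, List.countP_map, zero_add]
  congr 1
  refine Nat.cast_inj.mpr (List.countP_congr ?_)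
  intro k hk
  rw [List.mem_range] at hk
  have hkflat : k < (answers.length / p.length + 1) * p.length := by
    calc k < answers.length := hk
    _ < flat.length := hn_lt
    _ = _ := hflatlen
  have htake : (flat.take answers.length).getD k 0 = flat.getD k 0 := by
    rw [List.getD_eq_getElem?_getD, List.getD_eq_getElem?_getD, List.getElem?_take_of_lt hk]
  simp only [Function.comp_def, PySem.List.len_eq, PySem.Int.mod_natCast,
    PySem.List.pyGetD_natCast]
  rw [htake, hflat, pv_flat_rep_getD p _ k hkflat]

-- ===== VERDICT (by name: the statement is the Claim_ definition above) =====
theorem solution_spec : Claim_equal_solution := by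
  intro answers _
  show solution answers = solution_alt answers
  simp only [solution, solution_alt]
  have h := pv_loop_eq answers answers.length
  rw [show ((answers.length : Nat) : Int) = PySem.List.len answers from (PySem.List.len_eq _).symm] at h
  rw [h]
  rw [pv_score_eq pvArr1 (by decide) answers, pv_score_eq pvArr2 (by decide) answers,
    pv_score_eq pvArr3 (by decide) answers]
  simp only [List.map_cons, List.map_nil]
  exact pv_final _ _ _
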